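-- pv_equiv track=rewrite | github.com/dickens88/pisces | api/controllers/alert_service.py | _extract_entities_from_alert
-- ===== SOURCE A (Python) =====
-- def _extract_entities_from_alert(description: dict):
--     entities = []
--
--     for key, value in description.items():
--         key_lower = key.lower()
--
--         if not value:
--             continue
--
--         if "ip" in key_lower:
--             entity = {
--                 "type": "ip",
--                 "name": str(value),
--                 "from": "Source IP"
--             }
--             entities.append(entity)
--         elif "host" in key_lower:
--             entity = {
--                 "type": "host",
--                 "name": str(value),
--                 "from": "Host"
--             }
--             entities.append(entity)
--         elif "user" in key_lower:
--             entity = {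
--                 "type": "user",
--                 "name": str(value),
--                 "from": "Target User"
--             }
--             entities.append(entity)
--
--     return entities
-- ===== SOURCE B (Python) =====
-- RULES = [("ip", "ip", "Source IP"), ("host", "host", "Host"), ("user", "user", "Target User")]
--
--
-- def _extract_entities_from_alert(description: dict):
--     # Staged extraction: one pass per rule over the not-yet-classified items,
--     # then a sort by original position restores the input order.
--     remaining = [(i, k.lower(), v) for i, (k, v) in enumerate(description.items()) if v]
--     tagged = []
--     for keyword, etype, label in RULES:
--         nxt = []
--         for i, key_lower, value in remaining:
--             if keyword in key_lower:
--                 tagged.append((i, {"type": etype, "name": str(value), "from": label}))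
--             else:
--                 nxt.append((i, key_lower, value))
--         remaining = nxt
--     tagged.sort(key=lambda p: p[0])
--     return [entity for _, entity in tagged]
-- ===== Notes on version B (the rewrite author's own statement) =====
-- stated objective: alternative
-- what changed: Replaces the single pass with a per-key if/elif chain by staged extraction: one sweep per rule over the not-yet-classified items collecting (index, entity) pairs, followed by a sort on the original index to restore input order.
import Mathlib
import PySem

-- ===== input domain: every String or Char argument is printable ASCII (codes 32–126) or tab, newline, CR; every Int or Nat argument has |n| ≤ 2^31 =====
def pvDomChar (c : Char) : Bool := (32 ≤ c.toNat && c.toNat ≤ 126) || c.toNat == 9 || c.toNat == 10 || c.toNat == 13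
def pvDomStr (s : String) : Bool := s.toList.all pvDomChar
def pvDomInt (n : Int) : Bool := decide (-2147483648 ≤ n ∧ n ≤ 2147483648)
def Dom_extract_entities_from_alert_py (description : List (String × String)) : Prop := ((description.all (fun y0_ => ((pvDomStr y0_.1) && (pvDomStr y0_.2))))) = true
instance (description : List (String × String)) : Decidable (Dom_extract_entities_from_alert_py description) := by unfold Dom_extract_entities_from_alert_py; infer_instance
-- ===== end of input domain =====

-- B replaces A's single-pass if/elif chain by staged extraction (one sweep per rule over unclassified items, then a sort by original index); alternative decomposition, same cost up to the sort.


-- ===== PORT A =====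
def extract_entities_from_alert_py (description : List (String × String)) : List (List (String × String)) :=
  description.foldl (fun entities kv =>
    let key_lower := PySem.Str.lower kv.1
    if kv.2 == "" then entities
    else if PySem.Str.isIn "ip" key_lower then
      entities ++ [[("type", "ip"), ("name", kv.2), ("from", "Source IP")]]
    else if PySem.Str.isIn "host" key_lower then
      entities ++ [[("type", "host"), ("name", kv.2), ("from", "Host")]]
    else if PySem.Str.isIn "user" key_lower then
      entities ++ [[("type", "user"), ("name", kv.2), ("from", "Target User")]]
    else entities) []

-- ===== PORT B =====
def pvRulesB : List (String × String × String) :=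
  [("ip", "ip", "Source IP"), ("host", "host", "Host"), ("user", "user", "Target User")]

-- one sweep of Source B's inner loop: split `remaining` for rule r, appending matches to `tagged`
def pvStage (r : String × String × String)
    (remaining : List (Int × String × String))
    (tagged : List (Int × List (String × String))) :
    List (Int × String × String) × List (Int × List (String × String)) :=
  let res := remaining.foldl
    (fun acc it =>
      if PySem.Str.isIn r.1 it.2.1 then
        (acc.1 ++ [(it.1, [("type", r.2.1), ("name", it.2.2), ("from", r.2.2)])], acc.2)
      else (acc.1, acc.2 ++ [it]))
    (tagged, ([] : List (Int × String × String)))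
  (res.2, res.1)

def extract_entities_from_alert_py_alt (description : List (String × String)) : List (List (String × String)) :=
  let items := (PySem.List.enumerate description 0).filterMap
      (fun p => if p.2.2 == "" then none else some (p.1, PySem.Str.lower p.2.1, p.2.2))
  let final := pvRulesB.foldl (fun st r => pvStage r st.1 st.2)
      (items, ([] : List (Int × List (String × String))))
  (PySem.List.sorted final.2 (fun p => p.1) false).map (fun p => p.2)

-- ===== PRECONDITION & SPEC =====
def Spec_extract_entities_from_alert_py (description : List (String × String)) (out : List (List (String × String))) : Prop := out = extract_entities_from_alert_py_alt description
instance (description : List (String × String)) (out : List (List (String × String))) : Decidable (Spec_extract_entities_from_alert_py description out) := by unfold Spec_extract_entities_from_alert_py; infer_instance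

-- ===== CLAIM (what is proved, stated in full; the proofs are below) =====
def Claim_equal_extract_entities_from_alert_py : Prop := ∀ (description : List (String × String)), Dom_extract_entities_from_alert_py description → Spec_extract_entities_from_alert_py description (extract_entities_from_alert_py description)

-- ===== LEMMAS AND PROOFS =====

-- proof-only helpers: the entity a rule builds, and the first-matching-rule classifier
def pvEnt (r : String × String × String) (it : Int × String × String) :
    Int × List (String × String) :=
  (it.1, [("type", r.2.1), ("name", it.2.2), ("from", r.2.2)])

def pvClassify (rs : List (String × String × String)) (it : Int × String × String) :
    Option (Int × List (String × String)) :=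
  (rs.find? (fun r => PySem.Str.isIn r.1 it.2.1)).map (fun r => pvEnt r it)

-- A's per-item contribution, as an optional entity
def pvGA (kv : String × String) : Option (List (String × String)) :=
  if kv.2 == "" then none
  else if PySem.Str.isIn "ip" (PySem.Str.lower kv.1) then some [("type", "ip"), ("name", kv.2), ("from", "Source IP")]
  else if PySem.Str.isIn "host" (PySem.Str.lower kv.1) then some [("type", "host"), ("name", kv.2), ("from", "Host")]
  else if PySem.Str.isIn "user" (PySem.Str.lower kv.1) then some [("type", "user"), ("name", kv.2), ("from", "Target User")]
  else none

-- the inner sweep is a partition: matches mapped onto `tagged`, the rest kept in order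
lemma pvStage_eq (r : String × String × String) (rem : List (Int × String × String))
    (tag : List (Int × List (String × String))) :
    pvStage r rem tag =
      (rem.filter (fun it => !PySem.Str.isIn r.1 it.2.1),
       tag ++ (rem.filter (fun it => PySem.Str.isIn r.1 it.2.1)).map (pvEnt r)) := by
  suffices h : ∀ tag0 nxt0, rem.foldl
      (fun acc it =>
        if PySem.Str.isIn r.1 it.2.1 then
          (acc.1 ++ [(it.1, [("type", r.2.1), ("name", it.2.2), ("from", r.2.2)])], acc.2)
        else (acc.1, acc.2 ++ [it])) (tag0, nxt0)
      = (tag0 ++ (rem.filter (fun it => PySem.Str.isIn r.1 it.2.1)).map (pvEnt r),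
         nxt0 ++ rem.filter (fun it => !PySem.Str.isIn r.1 it.2.1)) by
    simp only [pvStage]
    rw [h tag []]
    simp
  induction rem with
  | nil => intro tag0 nxt0; simp
  | cons it rest ih =>
    intro tag0 nxt0
    by_cases hm : PySem.Str.isIn r.1 it.2.1
    · rw [List.foldl_cons, if_pos hm, ih]
      simp only [PySem.Str.isIn] at hm
      simp [hm, pvEnt]
    · rw [List.foldl_cons, if_neg hm, ih]
      simp only [PySem.Str.isIn] at hm
      simp [hm]

-- running the rule stages yields a permutation of the classified items
lemma pvRun_perm (rs : List (String × String × String)) (rem : List (Int × String × String))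
    (tag : List (Int × List (String × String))) :
    ((rs.foldl (fun st r => pvStage r st.1 st.2) (rem, tag)).2).Perm
      (tag ++ rem.filterMap (pvClassify rs)) := by
  induction rs generalizing rem tag with
  | nil => simp [pvClassify]
  | cons r rs' ih =>
    rw [List.foldl_cons, pvStage_eq]
    have hcons : ∀ it : Int × String × String, pvClassify (r :: rs') it =
        if PySem.Str.isIn r.1 it.2.1 then some (pvEnt r it) else pvClassify rs' it := by
      intro it
      simp only [pvClassify, List.find?_cons]
      cases hb : PySem.Str.isIn r.1 it.2.1 <;> simp_all [PySem.Str.isIn]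
    have h1 : (rem.filter (fun it => PySem.Str.isIn r.1 it.2.1)).filterMap (pvClassify (r :: rs'))
        = (rem.filter (fun it => PySem.Str.isIn r.1 it.2.1)).map (pvEnt r) := by
      rw [List.filterMap_congr (g := fun it => some (pvEnt r it)) (fun it hit => by
            rw [hcons it, if_pos (List.mem_filter.mp hit).2])]
      simp
    have h2 : (rem.filter (fun it => !PySem.Str.isIn r.1 it.2.1)).filterMap (pvClassify (r :: rs'))
        = (rem.filter (fun it => !PySem.Str.isIn r.1 it.2.1)).filterMap (pvClassify rs') := by
      refine List.filterMap_congr (fun it hit => ?_)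
      rw [hcons it, if_neg (by simpa using (List.mem_filter.mp hit).2)]
    have hp := (List.filter_append_perm (fun it => PySem.Str.isIn r.1 it.2.1) rem).filterMap
      (pvClassify (r :: rs'))
    rw [List.filterMap_append, h1, h2] at hp
    refine (ih _ _).trans ?_
    rw [List.append_assoc]
    exact hp.append_left tag

-- A's loop accumulates exactly the filterMap of its per-item classifier
lemma pvA_foldl (l : List (String × String)) (acc : List (List (String × String))) :
    l.foldl (fun entities kv =>
      let key_lower := PySem.Str.lower kv.1
      if kv.2 == "" then entities
      else if PySem.Str.isIn "ip" key_lower then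
        entities ++ [[("type", "ip"), ("name", kv.2), ("from", "Source IP")]]
      else if PySem.Str.isIn "host" key_lower then
        entities ++ [[("type", "host"), ("name", kv.2), ("from", "Host")]]
      else if PySem.Str.isIn "user" key_lower then
        entities ++ [[("type", "user"), ("name", kv.2), ("from", "Target User")]]
      else entities) acc = acc ++ l.filterMap pvGA := by
  induction l generalizing acc with
  | nil => simp
  | cons kv rest ih =>
    rw [List.foldl_cons, ih, List.filterMap_cons]
    simp only [pvGA]
    split_ifs <;> simp

lemma pvA_eq (d : List (String × String)) :
    extract_entities_from_alert_py d = d.filterMap pvGA := by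
  unfold extract_entities_from_alert_py
  rw [pvA_foldl]
  simp

-- B's classifier, stripped of the index, is A's per-item classifier
lemma pvStep_BA (s : Int) (k v : String) (hv : (v == "") = false) :
    (pvClassify pvRulesB (s, PySem.Str.lower k, v)).map (fun p => p.2) = pvGA (k, v) := by
  simp only [pvClassify, pvRulesB, pvGA, pvEnt, List.find?_cons, hv]
  split_ifs <;> simp_all

-- the staged target, indices dropped, is A's filterMap
lemma pvEnum_eq (d : List (String × String)) (s : Int) :
    (((PySem.List.enumerate d s).filterMap
        (fun p => if p.2.2 == "" then none else some (p.1, PySem.Str.lower p.2.1, p.2.2))).filterMap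
      (pvClassify pvRulesB)).map (fun p => p.2) = d.filterMap pvGA := by
  induction d generalizing s with
  | nil => simp [PySem.List.enumerate_nil]
  | cons kv rest ih =>
    obtain ⟨k, v⟩ := kv
    rw [PySem.List.enumerate_cons, List.filterMap_cons]
    by_cases hv : (v == "") = true
    · rw [if_pos hv, ih]
      have hga : pvGA (k, v) = none := by simp [pvGA, hv]
      rw [List.filterMap_cons, hga]
    · rw [if_neg hv, List.filterMap_cons, List.filterMap_cons]
      have hstep := pvStep_BA s k v (by simpa using hv)
      cases hC : pvClassify pvRulesB (s, PySem.Str.lower k, v) with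
      | none =>
        rw [hC] at hstep
        simp only [Option.map_none] at hstep
        simp only [hC, ← hstep]
        exact ih (s + 1)
      | some e =>
        rw [hC] at hstep
        simp only [Option.map_some] at hstep
        simp only [← hstep, List.map_cons]
        exact congrArg _ (ih (s + 1))

-- the staged target carries strictly increasing original indices
lemma pv_target_pairwise (d : List (String × String)) :
    (((PySem.List.enumerate d 0).filterMap
        (fun p => if p.2.2 == "" then none else some (p.1, PySem.Str.lower p.2.1, p.2.2))).filterMap
      (pvClassify pvRulesB)).Pairwise (fun a b => a.1 < b.1) := by
  have he := PySem.List.pairwise_lt_enumerate d 0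
  have h1 : ((PySem.List.enumerate d 0).filterMap
      (fun p => if p.2.2 == "" then none else some (p.1, PySem.Str.lower p.2.1, p.2.2))).Pairwise
      (fun a b => a.1 < b.1) := by
    rw [List.pairwise_filterMap]
    refine he.imp ?_
    intro a b hab x hx y hy
    split_ifs at hx hy <;> simp_all
    cases hx; cases hy; simpa using hab
  rw [List.pairwise_filterMap]
  refine h1.imp ?_
  intro a b hab x hx y hy
  simp only [pvClassify, Option.map_eq_some_iff] at hx hy
  obtain ⟨r1, -, rfl⟩ := hx
  obtain ⟨r2, -, rfl⟩ := hy
  simpa [pvEnt] using hab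

-- ===== VERDICT (by name: the statement is the Claim_ definition above) =====
theorem extract_entities_from_alert_py_spec : Claim_equal_extract_entities_from_alert_py := by
  intro d _
  unfold Spec_extract_entities_from_alert_py extract_entities_from_alert_py_alt
  dsimp only
  rw [pvA_eq]
  have hperm := pvRun_perm pvRulesB ((PySem.List.enumerate d 0).filterMap
    (fun p => if p.2.2 == "" then none else some (p.1, PySem.Str.lower p.2.1, p.2.2))) []
  rw [List.nil_append] at hperm
  rw [PySem.List.sorted_eq_of_perm_of_pairwise_lt _ _ (fun p => p.1) hperm.symm
    (pv_target_pairwise d)]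
  exact (pvEnum_eq d 0).symm
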